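-- pv_equiv track=rewrite | github.com/Fzldq/Codility | 6.Triangle.py | solution
-- ===== SOURCE A (Python) =====
-- def solution(A):
--     A = [i for i in A if i > 0]
--     l = len(A)
--     if l < 3:
--         return 0
--     A.sort()
--     for i in range(l - 2):
--         if A[i + 1] > A[i + 2] - A[i]:
--             return 1
--     else:
--         return 0
-- ===== SOURCE B (Python) =====
-- def solution(A):
--     n = len(A)
--     if n < 3:
--         return 0
--     for i in range(n - 2):
--         for j in range(i + 1, n - 1):
--             for k in range(j + 1, n):
--                 if A[i] + A[j] > A[k] and A[j] + A[k] > A[i] and A[i] + A[k] > A[j]: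
--                     return 1
--     return 0
-- ===== Notes on version B (the rewrite author's own statement) =====
-- stated objective: alternative
-- what changed: Replaces filter-positives + sort + single greedy adjacent-window pass by a direct brute-force scan of all index triples i<j<k testing the full triangle inequality; no sorting and no positivity filter needed.
import Mathlib
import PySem

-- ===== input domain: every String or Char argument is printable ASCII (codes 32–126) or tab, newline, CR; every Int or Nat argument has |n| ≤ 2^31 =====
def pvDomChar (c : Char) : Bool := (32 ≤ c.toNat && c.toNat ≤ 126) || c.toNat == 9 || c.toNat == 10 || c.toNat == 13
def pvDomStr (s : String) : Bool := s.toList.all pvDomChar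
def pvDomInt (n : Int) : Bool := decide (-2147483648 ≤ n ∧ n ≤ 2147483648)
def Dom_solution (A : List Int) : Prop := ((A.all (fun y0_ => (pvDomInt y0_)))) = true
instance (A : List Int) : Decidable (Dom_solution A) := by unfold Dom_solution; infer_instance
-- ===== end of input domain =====

-- B replaces A's filter-positives + sort + greedy adjacent-window pass by a direct
-- brute-force scan of all index triples i<j<k testing the full triangle inequality
-- (alternative algorithm, same return value; B is not faster).

-- ===== PORT A =====
-- the loop 'for i in range(l-2): if A[i+1] > A[i+2] - A[i]: return 1' as the obvious
-- window recursion over the sorted list (window at i = the first three of the suffix)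
def solGo : List Int → Int
  | x :: y :: z :: rest => if y > z - x then 1 else solGo (y :: z :: rest)
  | _ => 0

def solution (A : List Int) : Int :=
  let A1 := A.filter (fun i => decide (i > 0))
  if A1.length < 3 then 0
  else solGo (PySem.List.sorted A1 (fun x => x) false)

-- ===== PORT B =====
def triB (x y z : Int) : Bool := decide (x + y > z) && decide (y + z > x) && decide (x + z > y)

-- innermost loop: for k in range(j+1, n), scanning the suffix after position j
def loopK (x y : Int) : List Int → Bool
  | [] => false
  | z :: rest => triB x y z || loopK x y rest

-- middle loop: for j in range(i+1, n-1)
def loopJ (x : Int) : List Int → Bool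
  | [] => false
  | y :: rest => loopK x y rest || loopJ x rest

-- outer loop: for i in range(n-2)
def loopI : List Int → Bool
  | [] => false
  | x :: rest => loopJ x rest || loopI rest

def solution_alt (A : List Int) : Int :=
  if A.length < 3 then 0 else if loopI A then 1 else 0

-- ===== PRECONDITION & SPEC =====
def Spec_solution (A : List Int) (out : Int) : Prop := out = solution_alt A
instance (A : List Int) (out : Int) : Decidable (Spec_solution A out) := by unfold Spec_solution; infer_instance

-- ===== CLAIM (what is proved, stated in full; the proofs are below) =====
def Claim_equal_solution : Prop := ∀ (A : List Int), Dom_solution A → Spec_solution A (solution A)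

-- ===== LEMMAS AND PROOFS =====

lemma loopK_iff (x y : Int) (L : List Int) :
    loopK x y L = true ↔ ∃ z ∈ L, triB x y z = true := by
  induction L with
  | nil => simp [loopK]
  | cons a t ih => simp [loopK, ih]

lemma loopJ_iff (x : Int) (L : List Int) :
    loopJ x L = true ↔ ∃ y z, List.Sublist [y, z] L ∧ triB x y z = true := by
  induction L with
  | nil => simp [loopJ]
  | cons a t ih =>
    simp only [loopJ, Bool.or_eq_true, loopK_iff, ih]
    constructor
    · rintro (⟨z, hz, ht⟩ | ⟨y, z, hs, ht⟩)
      · exact ⟨a, z, List.cons_sublist_cons.mpr (List.singleton_sublist.mpr hz), ht⟩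
      · exact ⟨y, z, hs.cons a, ht⟩
    · rintro ⟨y, z, hs, ht⟩
      rcases List.sublist_cons_iff.mp hs with h | ⟨r, hr, hr'⟩
      · exact Or.inr ⟨y, z, h, ht⟩
      · cases hr
        exact Or.inl ⟨z, List.singleton_sublist.mp hr', ht⟩

lemma loopI_iff (L : List Int) :
    loopI L = true ↔ ∃ x y z, List.Sublist [x, y, z] L ∧ triB x y z = true := by
  induction L with
  | nil => simp [loopI]
  | cons a t ih =>
    simp only [loopI, Bool.or_eq_true, loopJ_iff, ih]
    constructor
    · rintro (⟨y, z, hs, ht⟩ | ⟨x, y, z, hs, ht⟩)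
      · exact ⟨a, y, z, List.cons_sublist_cons.mpr hs, ht⟩
      · exact ⟨x, y, z, hs.cons a, ht⟩
    · rintro ⟨x, y, z, hs, ht⟩
      rcases List.sublist_cons_iff.mp hs with h | ⟨r, hr, hr'⟩
      · exact Or.inr ⟨x, y, z, h, ht⟩
      · cases hr
        exact Or.inl ⟨y, z, hr', ht⟩

lemma triB_iff (x y z : Int) : triB x y z = true ↔ x + y > z ∧ y + z > x ∧ x + z > y := by
  simp [triB]; tauto

-- the full triangle test is invariant under permutation of the three values
lemma triB_perm {a b c x y z : Int} (h : List.Perm [a, b, c] [x, y, z])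
    (ht : triB x y z = true) : triB a b c = true := by
  have hsum : a + b + c = x + y + z := by
    have := h.sum_eq; simp at this; omega
  have ha : a = x ∨ a = y ∨ a = z := by simpa using h.mem_iff.mp (by simp : a ∈ [a, b, c])
  have hb : b = x ∨ b = y ∨ b = z := by simpa using h.mem_iff.mp (by simp : b ∈ [a, b, c])
  have hc : c = x ∨ c = y ∨ c = z := by simpa using h.mem_iff.mp (by simp : c ∈ [a, b, c])
  rw [triB_iff] at ht ⊢
  rcases ha with rfl | rfl | rfl <;> rcases hb with h1 | h1 | h1 <;>
    rcases hc with h2 | h2 | h2 <;> omega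

lemma triB_pos {x y z : Int} (ht : triB x y z = true) : 0 < x ∧ 0 < y ∧ 0 < z := by
  rw [triB_iff] at ht; omega

lemma solGo_cons {T : List Int} (a : Int) (h : solGo T = 1) : solGo (a :: T) = 1 := by
  match T with
  | [] => simp [solGo] at h
  | [b] => simp [solGo] at h
  | b :: c :: rest =>
    simp only [solGo] at h ⊢
    split_ifs with h1
    · rfl
    · exact h

-- innermost stair: head pair already fixed, third element somewhere in the tail
lemma solGo_fire3 : ∀ (T : List Int) (x y z : Int), (x :: y :: T).Pairwise (· ≤ ·) →
    z ∈ T → x + y > z → solGo (x :: y :: T) = 1 := by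
  intro T
  induction T with
  | nil => intro x y z _ hz; simp at hz
  | cons c T' ih =>
    intro x y z hp hz hxy
    rcases List.mem_cons.mp hz with rfl | hz'
    · simp only [solGo]
      rw [if_pos (by omega)]
    · have hxc : x ≤ c := (List.pairwise_cons.mp hp).1 c (by simp)
      have hp' : (y :: c :: T').Pairwise (· ≤ ·) := (List.pairwise_cons.mp hp).2
      exact solGo_cons x (ih y c z hp' hz' (by omega))

-- middle stair: head fixed, remaining pair a sublist of the tail
lemma solGo_fire2 : ∀ (T : List Int) (x y z : Int), (x :: T).Pairwise (· ≤ ·) →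
    List.Sublist [y, z] T → x + y > z → solGo (x :: T) = 1 := by
  intro T
  induction T with
  | nil => intro x y z _ hs; simp at hs
  | cons b T' ih =>
    intro x y z hp hs hxy
    rcases List.sublist_cons_iff.mp hs with h | ⟨r, hr, hr'⟩
    · have hxb : x ≤ b := (List.pairwise_cons.mp hp).1 b (by simp)
      have hp' : (b :: T').Pairwise (· ≤ ·) := (List.pairwise_cons.mp hp).2
      exact solGo_cons x (ih b y z hp' h (by omega))
    · cases hr
      exact solGo_fire3 T' x b z hp (List.singleton_sublist.mp hr') hxy

-- if a sorted list contains (as a sublist) a triple x ≤ y ≤ z with x+y > z,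
-- the adjacent-window scan fires
lemma solGo_fire : ∀ (S : List Int) (x y z : Int), S.Pairwise (· ≤ ·) →
    List.Sublist [x, y, z] S → x + y > z → solGo S = 1 := by
  intro S
  induction S with
  | nil => intro x y z _ hs; simp at hs
  | cons a T ih =>
    intro x y z hp hs hxy
    rcases List.sublist_cons_iff.mp hs with h | ⟨r, hr, hr'⟩
    · exact solGo_cons a (ih x y z (List.pairwise_cons.mp hp).2 h hxy)
    · cases hr
      exact solGo_fire2 T a y z hp hr' hxy

lemma solGo_exists : ∀ (S : List Int), solGo S = 1 →
    ∃ x y z, List.Sublist [x, y, z] S ∧ x + y > z := by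
  intro S
  induction S with
  | nil => intro h; simp [solGo] at h
  | cons a T ih =>
    intro h
    match T, ih with
    | [], _ => simp [solGo] at h
    | [b], _ => simp [solGo] at h
    | b :: c :: rest, ih =>
      simp only [solGo] at h
      split_ifs at h with h1
      · exact ⟨a, b, c, List.sublist_append_left [a, b, c] rest, by omega⟩
      · obtain ⟨x, y, z, hs, hxy⟩ := ih h
        exact ⟨x, y, z, hs.cons a, hxy⟩

lemma solGo_zero_or_one : ∀ (S : List Int), solGo S = 0 ∨ solGo S = 1 := by
  intro S
  induction S with
  | nil => left; rfl
  | cons a T ih =>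
    match T, ih with
    | [], _ => left; rfl
    | [b], _ => left; rfl
    | b :: c :: rest, ih =>
      simp only [solGo]
      split_ifs with h1
      · right; rfl
      · exact ih

-- a positive triple that is a sublist of A is a sublist of A's positive filter
lemma sublist_filter_pos {a b c : Int} {A : List Int} (hs : List.Sublist [a, b, c] A)
    (ha : 0 < a) (hb : 0 < b) (hc : 0 < c) :
    List.Sublist [a, b, c] (A.filter (fun i => decide (i > 0))) := by
  have := hs.filter (fun i => decide (i > 0))
  simpa [List.filter_cons, ha, hb, hc] using this

-- main bridge: A's greedy pass on the sorted positive filter fires iff B's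
-- brute-force triple scan fires
lemma fire_iff (A : List Int) :
    (solGo (PySem.List.sorted (A.filter (fun i => decide (i > 0))) (fun x => x) false) = 1)
      ↔ loopI A = true := by
  set A1 := A.filter (fun i => decide (i > 0)) with hA1
  set S := PySem.List.sorted A1 (fun x => x) false with hS
  have hperm : S.Perm A1 := PySem.List.sorted_perm A1 (fun x => x) false
  have hsorted : S.Pairwise (fun a b => a ≤ b) := PySem.List.sorted_pairwise A1 (fun x => x)
  constructor
  · intro h
    obtain ⟨x, y, z, hsub, hxy⟩ := solGo_exists S h
    have hmemS : ∀ w ∈ ([x, y, z] : List Int), 0 < w := by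
      intro w hw
      have hw1 : w ∈ A1 := hperm.mem_iff.mp (hsub.subset hw)
      have := List.of_mem_filter hw1
      simpa using this
    have hord : ([x, y, z] : List Int).Pairwise (· ≤ ·) := hsorted.sublist hsub
    have hxy2 : x ≤ y := (List.pairwise_cons.mp hord).1 y (by simp)
    have hyz : y ≤ z := (List.pairwise_cons.mp (List.pairwise_cons.mp hord).2).1 z (by simp)
    have hx : 0 < x := hmemS x (by simp)
    have hy : 0 < y := hmemS y (by simp)
    have hz : 0 < z := hmemS z (by simp)
    have htri : triB x y z = true := by rw [triB_iff]; omega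
    have hsubA : List.Subperm [x, y, z] A :=
      (hsub.subperm.trans hperm.subperm).trans (List.filter_sublist).subperm
    obtain ⟨t, htp, hts⟩ := hsubA
    have hlen : t.length = 3 := by simpa using htp.length_eq
    match t, htp, hts, hlen with
    | [a, b, c], htp, hts, _ =>
      rw [loopI_iff]
      exact ⟨a, b, c, hts, triB_perm htp htri⟩
  · intro h
    obtain ⟨a, b, c, hs, ht⟩ := (loopI_iff A).mp h
    obtain ⟨ha, hb, hc⟩ := triB_pos ht
    have hsub1 : List.Sublist [a, b, c] A1 := hA1 ▸ sublist_filter_pos hs ha hb hc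
    have htp : (PySem.List.sorted ([a, b, c] : List Int) (fun x => x) false).Perm [a, b, c] :=
      PySem.List.sorted_perm [a, b, c] (fun x => x) false
    have htsort : (PySem.List.sorted ([a, b, c] : List Int) (fun x => x) false).Pairwise
        (fun u v => u ≤ v) := PySem.List.sorted_pairwise [a, b, c] (fun x => x)
    have hlen : (PySem.List.sorted ([a, b, c] : List Int) (fun x => x) false).length = 3 := by
      simp [htp.length_eq]
    match hq : PySem.List.sorted ([a, b, c] : List Int) (fun x => x) false, htp, htsort, hlen with
    | [x, y, z], htp, htsort, _ =>
      have htri : triB x y z = true := triB_perm htp ht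
      have hsubS : List.Sublist [x, y, z] S := by
        refine List.sublist_of_subperm_of_pairwise (r := (· ≤ ·)) ?_ htsort hsorted
        exact List.Subperm.trans ⟨[a, b, c], htp.symm, hsub1⟩ hperm.symm.subperm
      have hxy : x + y > z := by
        have hyz : y ≤ z :=
          (List.pairwise_cons.mp (List.pairwise_cons.mp htsort).2).1 z (by simp)
        rw [triB_iff] at htri
        omega
      exact solGo_fire S x y z hsorted hsubS hxy

-- ===== VERDICT (by name: the statement is the Claim_ definition above) =====
theorem solution_spec : Claim_equal_solution := by
  intro A _
  unfold Spec_solution solution solution_alt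
  set A1 := A.filter (fun i => decide (i > 0)) with hA1
  have hle : A1.length ≤ A.length := (List.filter_sublist).length_le
  by_cases hfire : loopI A = true
  · have h1 : solGo (PySem.List.sorted A1 (fun x => x) false) = 1 := (fire_iff A).mpr hfire
    obtain ⟨a, b, c, hs, ht⟩ := (loopI_iff A).mp hfire
    obtain ⟨ha, hb, hc⟩ := triB_pos ht
    have h3 : 3 ≤ A1.length := by
      exact (hA1 ▸ sublist_filter_pos hs ha hb hc).length_le
    rw [if_neg (by omega), if_neg (by omega), if_pos hfire, h1]
  · have hfire' : loopI A = false := by simpa using hfire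
    rw [hfire']
    by_cases hl : A1.length < 3
    · rw [if_pos hl]; simp
    · rw [if_neg hl]
      have h0 : solGo (PySem.List.sorted A1 (fun x => x) false) = 0 := by
        rcases solGo_zero_or_one (PySem.List.sorted A1 (fun x => x) false) with h | h
        · exact h
        · rw [(fire_iff A).mp h] at hfire'; cases hfire'
      rw [h0]; simp
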